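-- pv_equiv track=rewrite | github.com/burger-bro/LeetCode-Solution | PY/LeetCode/2140.py | mostPoints
-- ===== SOURCE A (Python) =====
-- from typing import List
--
-- def mostPoints(questions: List[List[int]]) -> int:
--     length = len(questions)
--     dp = [0] * length
--     dp[-1] = questions[-1][0]
--     for i in range(length-2, -1, -1):
--         nxt_i = i+questions[i][1]+1
--         if nxt_i < length:
--             dp[i] = max(questions[i][0]+dp[nxt_i], dp[i+1])
--         else:
--             dp[i] = max(questions[i][0], dp[i+1])
--     return dp[0]
--
-- questions = [[i, i+1] for i in range(1, 5000)]
-- ===== SOURCE B (Python) =====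
-- def mostPoints(questions):
--     # forward "push" DP: dp[j] = best score already banked when slot j becomes available;
--     # a solve that releases past the end is final and goes to `finals`
--     n = len(questions)
--     dp = [0] * (n + 1)
--     finals = []
--     for i in range(n):
--         if dp[i] > dp[i + 1]:
--             dp[i + 1] = dp[i]
--         take = dp[i] + questions[i][0]
--         nxt = i + questions[i][1] + 1
--         if nxt < n:
--             if take > dp[nxt]:
--                 dp[nxt] = take
--         else:
--             finals.append(take)
--     return max(finals)
-- ===== Notes on version B (the rewrite author's own statement) =====
-- stated objective: alternative
-- what changed: Replaces the backward pull DP (dp[i] from dp[i+1] and dp[i+questions[i][1]+1], seeded with dp[-1]) by a forward push DP over a dp array of length n+1 that pushes skip values to dp[i+1], pushes solves releasing before n to dp[nxt], collects solves releasing at or past n in a finals list, and returns max(finals).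
-- outside the precondition, e.g. on mostPoints([[1, -2], [4, 0]]): A returns 5, B returns 4; on mostPoints([[2, 0], [3, -1]]): A returns 5, B raises ValueError; on mostPoints([[7]]): A returns 7, B raises IndexError
import Mathlib
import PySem

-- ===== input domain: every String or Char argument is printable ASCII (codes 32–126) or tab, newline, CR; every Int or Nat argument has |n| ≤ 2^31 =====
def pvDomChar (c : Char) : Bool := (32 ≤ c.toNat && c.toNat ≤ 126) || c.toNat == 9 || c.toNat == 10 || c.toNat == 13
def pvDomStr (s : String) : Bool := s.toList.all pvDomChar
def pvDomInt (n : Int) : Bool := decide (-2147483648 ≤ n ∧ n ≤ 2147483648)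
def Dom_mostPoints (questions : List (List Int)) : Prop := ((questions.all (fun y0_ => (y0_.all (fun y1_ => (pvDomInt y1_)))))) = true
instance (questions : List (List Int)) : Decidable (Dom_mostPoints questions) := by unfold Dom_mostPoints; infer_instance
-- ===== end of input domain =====

-- B replaces A's backward pull DP by a forward push DP collecting final solves (alternative decomposition, same O(n) cost).

-- ===== PORT A =====
def mostPoints (questions : List (List Int)) : Int :=
  let length : Int := questions.length
  -- dp = [0] * length; dp[-1] = questions[-1][0]
  let dp : List Int := List.replicate questions.length (0 : Int)
  let dp : List Int := PySem.List.pySetD dp (-1)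
      (PySem.List.pyGetD (PySem.List.pyGetD questions (-1) []) 0 0)
  -- for i in range(length-2, -1, -1): … (all indexing in range under Pre_)
  let dp : List Int := (PySem.List.pyRange (length - 2) (-1) (-1)).foldl
    (fun dp i =>
      let nxt_i : Int := i + PySem.List.pyGetD (PySem.List.pyGetD questions i []) 1 0 + 1
      if nxt_i < length then
        PySem.List.pySetD dp i
          (max (PySem.List.pyGetD (PySem.List.pyGetD questions i []) 0 0 + PySem.List.pyGetD dp nxt_i 0)
               (PySem.List.pyGetD dp (i + 1) 0))
      else
        PySem.List.pySetD dp i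
          (max (PySem.List.pyGetD (PySem.List.pyGetD questions i []) 0 0)
               (PySem.List.pyGetD dp (i + 1) 0)))
    dp
  PySem.List.pyGetD dp 0 0

-- ===== PORT B =====
def mostPoints_alt (questions : List (List Int)) : Int :=
  let n := questions.length
  let dp : List Int := List.replicate (n + 1) (0 : Int)
  -- for i in range(n): push the skip value to dp[i+1]; a solve releasing before n
  -- is pushed to dp[nxt], a solve releasing at or past n is appended to finals
  let st : List Int × List Int := (List.range n).foldl
    (fun (st : List Int × List Int) i =>
      let dp := st.1
      let finals := st.2
      let dp := if dp.getD i 0 > dp.getD (i + 1) 0 then dp.set (i + 1) (dp.getD i 0) else dp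
      let take := dp.getD i 0 + (questions.getD i []).getD 0 0
      let nxt : Int := (i : Int) + (questions.getD i []).getD 1 0 + 1
      if nxt < (n : Int) then
        (if take > PySem.List.pyGetD dp nxt 0 then PySem.List.pySetD dp nxt take else dp, finals)
      else
        (dp, finals ++ [take]))
    (dp, [])
  -- return max(finals)  (ValueError on an empty finals is excluded by Pre_)
  (PySem.List.max? st.2 (fun x => x)).getD 0

-- ===== PRECONDITION & SPEC =====
-- Pre_ restricts to the problem's natural domain (at least one question, each a [points, brainpower]
-- pair with nonnegative brainpower): outside it A raises (empty list, a too-short non-last question,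
-- a very negative brainpower) or returns accidents of its implementation (negative-index wraparound /
-- reads of not-yet-written dp slots for negative brainpower; the last question's brainpower is never
-- read, so A returns where a last question [p] makes B raise).
def Pre_mostPoints (questions : List (List Int)) : Prop :=
  questions ≠ [] ∧ ∀ q ∈ questions, 2 ≤ q.length ∧ 0 ≤ q.getD 1 0
instance (questions : List (List Int)) : Decidable (Pre_mostPoints questions) := by
  unfold Pre_mostPoints; infer_instance
def pvWitness_mostPoints : List (List Int) := [[3, 1], [4, 0], [2, 2]]
def Spec_mostPoints (questions : List (List Int)) (out : Int) : Prop := out = mostPoints_alt questions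
instance (questions : List (List Int)) (out : Int) : Decidable (Spec_mostPoints questions out) := by
  unfold Spec_mostPoints; infer_instance

-- ===== CLAIM (what is proved, stated in full; the proofs are below) =====
def Claim_equal_mostPoints : Prop := ∀ (questions : List (List Int)), Dom_mostPoints questions → Pre_mostPoints questions → Spec_mostPoints questions (mostPoints questions)

-- ===== LEMMAS AND PROOFS =====

-- points / brainpower accessors and the DP value function Gv (A's dp[i])
def pvA (qs : List (List Int)) (i : Nat) : Int := (qs.getD i []).getD 0 0
def pvB (qs : List (List Int)) (i : Nat) : Nat := ((qs.getD i []).getD 1 0).toNat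

def pvG (qs : List (List Int)) : Nat → Nat → Int
  | 0, _ => 0
  | fuel + 1, i =>
      let s : Int := if i + pvB qs i + 1 < qs.length
        then pvA qs i + pvG qs fuel (i + pvB qs i + 1)
        else pvA qs i
      if i + 1 < qs.length then max s (pvG qs fuel (i + 1)) else s

def Gv (qs : List (List Int)) (i : Nat) : Int := pvG qs (qs.length - i) i

theorem pvG_stable (qs : List (List Int)) :
    ∀ f1 f2 i, qs.length ≤ f1 + i → qs.length ≤ f2 + i → i < qs.length →
      pvG qs f1 i = pvG qs f2 i := by
  intro f1
  induction f1 with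
  | zero =>
    intro f2 i h1 h2 hi
    omega
  | succ f1 ih =>
    intro f2 i h1 h2 hi
    cases f2 with
    | zero => omega
    | succ f2 =>
      simp only [pvG]
      by_cases hb : i + pvB qs i + 1 < qs.length
      · by_cases hs : i + 1 < qs.length
        · rw [if_pos hb, if_pos hb, if_pos hs, if_pos hs,
            ih f2 (i + pvB qs i + 1) (by omega) (by omega) hb,
            ih f2 (i + 1) (by omega) (by omega) hs]
        · rw [if_pos hb, if_pos hb, if_neg hs, if_neg hs,
            ih f2 (i + pvB qs i + 1) (by omega) (by omega) hb]
      · by_cases hs : i + 1 < qs.length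
        · rw [if_neg hb, if_neg hb, if_pos hs, if_pos hs,
            ih f2 (i + 1) (by omega) (by omega) hs]
        · rw [if_neg hb, if_neg hb, if_neg hs, if_neg hs]

theorem Gv_unfold (qs : List (List Int)) (i : Nat) (h : i < qs.length) :
    Gv qs i =
      (if i + 1 < qs.length
        then max (if i + pvB qs i + 1 < qs.length
                    then pvA qs i + Gv qs (i + pvB qs i + 1)
                    else pvA qs i)
                 (Gv qs (i + 1))
        else (if i + pvB qs i + 1 < qs.length
                then pvA qs i + Gv qs (i + pvB qs i + 1)
                else pvA qs i)) := by
  unfold Gv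
  have hfi : qs.length - i = (qs.length - i - 1) + 1 := by omega
  rw [hfi]
  simp only [pvG]
  by_cases hb : i + pvB qs i + 1 < qs.length
  · by_cases hs : i + 1 < qs.length
    · rw [if_pos hb, if_pos hb, if_pos hs, if_pos hs,
        pvG_stable qs (qs.length - i - 1) (qs.length - (i + pvB qs i + 1)) _ (by omega) (by omega) hb,
        pvG_stable qs (qs.length - i - 1) (qs.length - (i + 1)) _ (by omega) (by omega) hs]
    · rw [if_pos hb, if_pos hb, if_neg hs, if_neg hs,
        pvG_stable qs (qs.length - i - 1) (qs.length - (i + pvB qs i + 1)) _ (by omega) (by omega) hb]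
  · by_cases hs : i + 1 < qs.length
    · rw [if_neg hb, if_neg hb, if_pos hs, if_pos hs,
        pvG_stable qs (qs.length - i - 1) (qs.length - (i + 1)) _ (by omega) (by omega) hs]
    · rw [if_neg hb, if_neg hb, if_neg hs, if_neg hs]

theorem Gv_rec_mid (qs : List (List Int)) (i : Nat) (h1 : i + 1 < qs.length)
    (h2 : i + pvB qs i + 1 < qs.length) :
    Gv qs i = max (pvA qs i + Gv qs (i + pvB qs i + 1)) (Gv qs (i + 1)) := by
  rw [Gv_unfold qs i (by omega), if_pos h1, if_pos h2]

theorem Gv_rec_mid_term (qs : List (List Int)) (i : Nat) (h1 : i + 1 < qs.length)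
    (h2 : ¬ (i + pvB qs i + 1 < qs.length)) :
    Gv qs i = max (pvA qs i) (Gv qs (i + 1)) := by
  rw [Gv_unfold qs i (by omega), if_pos h1, if_neg h2]

theorem Gv_rec_last (qs : List (List Int)) (i : Nat) (h0 : i < qs.length)
    (h1 : ¬ (i + 1 < qs.length)) :
    Gv qs i = pvA qs i := by
  rw [Gv_unfold qs i h0, if_neg h1, if_neg (by omega)]

theorem Gv_succ_le (qs : List (List Int)) (i : Nat) (h : i + 1 < qs.length) :
    Gv qs (i + 1) ≤ Gv qs i := by
  by_cases hb : i + pvB qs i + 1 < qs.length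
  · rw [Gv_rec_mid qs i h hb]; exact le_max_right _ _
  · rw [Gv_rec_mid_term qs i h hb]; exact le_max_right _ _

theorem Gv_antitone (qs : List (List Int)) {i j : Nat} (hij : i ≤ j) (hj : j < qs.length) :
    Gv qs j ≤ Gv qs i := by
  induction j with
  | zero => simp_all
  | succ j ih =>
    rcases Nat.lt_or_ge i (j + 1) with hlt | hge
    · exact le_trans (Gv_succ_le qs j hj) (ih (by omega) (by omega))
    · have : i = j + 1 := by omega
      subst this; rfl

-- list-indexing helpers used by the proofs
theorem getD_set_self (xs : List Int) (i : Nat) (v : Int) (h : i < xs.length) :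
    (xs.set i v).getD i 0 = v := by
  simp [List.getD_eq_getElem?_getD, h]

theorem getD_set_ne (xs : List Int) (i j : Nat) (v : Int) (h : j ≠ i) :
    (xs.set i v).getD j 0 = xs.getD j 0 := by
  simp [List.getD_eq_getElem?_getD, Ne.symm h]

theorem getD_replicate_zero (n j : Nat) : (List.replicate n (0:Int)).getD j 0 = 0 := by
  rcases Nat.lt_or_ge j n with h | h
  · simp [List.getD_eq_getElem?_getD, h]
  · rw [List.getD_eq_getElem?_getD, List.getElem?_eq_none (by simpa)]; rfl

theorem pySetD_neg_one (xs : List Int) (v : Int) (h : xs ≠ []) :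
    PySem.List.pySetD xs (-1) v = xs.set (xs.length - 1) v := by
  have hl : 0 < xs.length := List.length_pos_iff.mpr h
  simp only [PySem.List.pySetD, PySem.List.pySet?, PySem.List.pyIdx?]
  rw [if_neg (by omega), if_pos (by omega)]
  simp

theorem pyGetD_last_val (qs : List (List Int)) (h : qs ≠ []) :
    PySem.List.pyGetD (PySem.List.pyGetD qs (-1) []) 0 0 = pvA qs (qs.length - 1) := by
  rw [PySem.List.pyGetD_neg_one qs [] h, PySem.List.pyGetD_zero]
  have hl : 0 < qs.length := List.length_pos_iff.mpr h
  unfold pvA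
  rw [List.getD_eq_getElem qs [] (by omega), List.getLast_eq_getElem]

-- facts from the precondition
theorem pre_mem (qs : List (List Int)) (k : Nat) (hk : k < qs.length) : qs.getD k [] ∈ qs := by
  rw [List.getD_eq_getElem _ _ hk]; exact List.getElem_mem hk

theorem pre_bZ (qs : List (List Int)) (hpre : Pre_mostPoints qs) (k : Nat)
    (hk : k < qs.length) : (qs.getD k []).getD 1 0 = (pvB qs k : Int) := by
  have := (hpre.2 _ (pre_mem qs k hk)).2
  rw [pvB, Int.toNat_of_nonneg this]

-- ===== A side: the backward loop fills dp with Gv =====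
def stepA (questions : List (List Int)) (dp : List Int) (i : Int) : List Int :=
  let nxt_i : Int := i + PySem.List.pyGetD (PySem.List.pyGetD questions i []) 1 0 + 1
  if nxt_i < (questions.length : Int) then
    PySem.List.pySetD dp i
      (max (PySem.List.pyGetD (PySem.List.pyGetD questions i []) 0 0 + PySem.List.pyGetD dp nxt_i 0)
           (PySem.List.pyGetD dp (i + 1) 0))
  else
    PySem.List.pySetD dp i
      (max (PySem.List.pyGetD (PySem.List.pyGetD questions i []) 0 0)
           (PySem.List.pyGetD dp (i + 1) 0))

theorem mostPoints_eq_fold (qs : List (List Int)) :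
    mostPoints qs = PySem.List.pyGetD
      ((PySem.List.pyRange ((qs.length : Int) - 2) (-1) (-1)).foldl (stepA qs)
        (PySem.List.pySetD (List.replicate qs.length (0:Int)) (-1)
          (PySem.List.pyGetD (PySem.List.pyGetD qs (-1) []) 0 0))) 0 0 := rfl

def InvA (qs : List (List Int)) (k : Nat) (dp : List Int) : Prop :=
  dp.length = qs.length ∧ ∀ j, k ≤ j → j < qs.length → dp.getD j 0 = Gv qs j

theorem stepA_inv (qs : List (List Int)) (hpre : Pre_mostPoints qs) (k : Nat)
    (hk : k + 1 < qs.length) (dp : List Int) (h : InvA qs (k + 1) dp) :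
    InvA qs k (stepA qs dp (k : Int)) := by
  obtain ⟨hlen, hinv⟩ := h
  have hkq : k < qs.length := by omega
  have hq : PySem.List.pyGetD qs (k : Int) [] = qs.getD k [] := PySem.List.pyGetD_natCast qs k []
  have hb : PySem.List.pyGetD (PySem.List.pyGetD qs (k : Int) []) 1 0 = (pvB qs k : Int) := by
    rw [hq]
    have h1 : (1 : Int) = ((1 : Nat) : Int) := rfl
    rw [h1, PySem.List.pyGetD_natCast]
    exact pre_bZ qs hpre k hkq
  have ha : PySem.List.pyGetD (PySem.List.pyGetD qs (k : Int) []) 0 0 = pvA qs k := by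
    rw [hq]
    have h0 : (0 : Int) = ((0 : Nat) : Int) := rfl
    rw [h0, PySem.List.pyGetD_natCast]
    rfl
  have hread1 : PySem.List.pyGetD dp ((k : Int) + 1) 0 = Gv qs (k + 1) := by
    have hc : ((k : Int) + 1) = ((k + 1 : Nat) : Int) := by push_cast; ring
    rw [hc, PySem.List.pyGetD_natCast]
    exact hinv (k + 1) (le_refl _) hk
  unfold stepA
  rw [hb, ha, hread1]
  have hcast : (k : Int) + (pvB qs k : Int) + 1 = ((k + pvB qs k + 1 : Nat) : Int) := by
    push_cast; ring
  rw [hcast]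
  by_cases hnx : k + pvB qs k + 1 < qs.length
  · rw [if_pos (by exact_mod_cast hnx)]
    rw [PySem.List.pyGetD_natCast dp (k + pvB qs k + 1) 0,
      hinv (k + pvB qs k + 1) (by omega) hnx, PySem.List.pySetD_natCast]
    refine ⟨by rw [List.length_set, hlen], ?_⟩
    intro j hj1 hj2
    by_cases hjk : j = k
    · subst hjk
      rw [getD_set_self dp j _ (by omega), Gv_rec_mid qs j hk hnx]
    · rw [getD_set_ne dp k j _ hjk]
      exact hinv j (by omega) hj2
  · rw [if_neg (by exact_mod_cast hnx)]
    rw [PySem.List.pySetD_natCast]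
    refine ⟨by rw [List.length_set, hlen], ?_⟩
    intro j hj1 hj2
    by_cases hjk : j = k
    · subst hjk
      rw [getD_set_self dp j _ (by omega), Gv_rec_mid_term qs j hk hnx]
    · rw [getD_set_ne dp k j _ hjk]
      exact hinv j (by omega) hj2

theorem loopA (qs : List (List Int)) (hpre : Pre_mostPoints qs) :
    ∀ (k : Nat), k < qs.length → ∀ dp, InvA qs k dp →
      InvA qs 0 ((PySem.List.pyRange ((k : Int) - 1) (-1) (-1)).foldl (stepA qs) dp) := by
  intro k
  induction k with
  | zero =>
    intro _ dp h
    rw [PySem.List.pyRange_neg_one_eq_nil (by norm_num)]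
    exact h
  | succ k ih =>
    intro hk dp h
    have hc : ((k + 1 : Nat) : Int) - 1 = (k : Nat) := by push_cast; ring
    rw [hc, PySem.List.pyRange_neg_one_cons (by omega), List.foldl_cons]
    exact ih (by omega) _ (stepA_inv qs hpre k hk dp h)

theorem mostPoints_eq_Gv (qs : List (List Int)) (hpre : Pre_mostPoints qs) :
    mostPoints qs = Gv qs 0 := by
  have hne := hpre.1
  have hn : 0 < qs.length := List.length_pos_iff.mpr hne
  rw [mostPoints_eq_fold, pySetD_neg_one _ _ (by simp [List.replicate_eq_nil_iff]; omega),
    pyGetD_last_val qs hne]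
  have hinit : InvA qs (qs.length - 1)
      ((List.replicate qs.length (0:Int)).set ((List.replicate qs.length (0:Int)).length - 1)
        (pvA qs (qs.length - 1))) := by
    rw [List.length_replicate]
    constructor
    · rw [List.length_set, List.length_replicate]
    · intro j hj1 hj2
      have hj : j = qs.length - 1 := by omega
      subst hj
      rw [getD_set_self _ _ _ (by rw [List.length_replicate]; omega)]
      rw [Gv_rec_last qs (qs.length - 1) (by omega) (by omega)]
  have hc : (qs.length : Int) - 2 = ((qs.length - 1 : Nat) : Int) - 1 := by push_cast [hn]; omega
  rw [hc]
  have hfin := loopA qs hpre (qs.length - 1) (by omega) _ hinit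
  obtain ⟨_, hfix⟩ := hfin
  rw [PySem.List.pyGetD_zero]
  exact hfix 0 (le_refl _) hn

-- ===== B side: the forward push loop, invariant "banked value + Gv bounds/attains Gv 0" =====
def stepB (questions : List (List Int)) (st : List Int × List Int) (i : Nat) : List Int × List Int :=
  let dp := st.1
  let finals := st.2
  let dp := if dp.getD i 0 > dp.getD (i + 1) 0 then dp.set (i + 1) (dp.getD i 0) else dp
  let take := dp.getD i 0 + (questions.getD i []).getD 0 0
  let nxt : Int := (i : Int) + (questions.getD i []).getD 1 0 + 1
  if nxt < (questions.length : Int) then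
    (if take > PySem.List.pyGetD dp nxt 0 then PySem.List.pySetD dp nxt take else dp, finals)
  else
    (dp, finals ++ [take])

theorem mostPoints_alt_eq_fold (qs : List (List Int)) :
    mostPoints_alt qs =
      (PySem.List.max?
        ((List.range qs.length).foldl (stepB qs)
          (List.replicate (qs.length + 1) (0:Int), [])).2 (fun x => x)).getD 0 := rfl

-- "relax" lemmas about the conditional overwrite  if w > dp[t] then dp[t] = w
theorem relax_length (dp : List Int) (t : Nat) (w : Int) :
    (if w > dp.getD t 0 then dp.set t w else dp).length = dp.length := by
  split_ifs <;> simp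

theorem relax_getD_ne (dp : List Int) (t : Nat) (w : Int) (j : Nat) (h : j ≠ t) :
    (if w > dp.getD t 0 then dp.set t w else dp).getD j 0 = dp.getD j 0 := by
  split_ifs
  · exact getD_set_ne dp t j w h
  · rfl

theorem relax_mono (dp : List Int) (t : Nat) (w : Int) (j : Nat) :
    dp.getD j 0 ≤ (if w > dp.getD t 0 then dp.set t w else dp).getD j 0 := by
  split_ifs with hc
  · by_cases hj : j = t
    · subst hj
      rcases Nat.lt_or_ge j dp.length with h | h
      · rw [getD_set_self _ _ _ h]; omega
      · rw [List.set_eq_of_length_le h]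
    · rw [getD_set_ne _ _ _ _ hj]
  · exact le_refl _

theorem relax_ge (dp : List Int) (t : Nat) (w : Int) (h : t < dp.length) :
    w ≤ (if w > dp.getD t 0 then dp.set t w else dp).getD t 0 := by
  split_ifs with hc
  · rw [getD_set_self _ _ _ h]
  · omega

theorem relax_le (dp : List Int) (t : Nat) (w : Int) (j : Nat) :
    (if w > dp.getD t 0 then dp.set t w else dp).getD j 0 ≤ max (dp.getD j 0) w := by
  split_ifs with hc
  · by_cases hj : j = t
    · subst hj
      rcases Nat.lt_or_ge j dp.length with h | h
      · rw [getD_set_self _ _ _ h]; omega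
      · rw [List.set_eq_of_length_le h]; omega
    · rw [getD_set_ne _ _ _ _ hj]; omega
  · omega

def InvB (qs : List (List Int)) (k : Nat) (st : List Int × List Int) : Prop :=
  st.1.length = qs.length + 1 ∧
  (∀ x ∈ st.2, x ≤ Gv qs 0) ∧
  (∀ j, k ≤ j → j + 1 ≤ qs.length → st.1.getD j 0 + Gv qs j ≤ Gv qs 0) ∧
  ((∃ x ∈ st.2, Gv qs 0 ≤ x) ∨
    (∃ j, k ≤ j ∧ j + 1 ≤ qs.length ∧ Gv qs 0 ≤ st.1.getD j 0 + Gv qs j))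

theorem stepB_inv (qs : List (List Int)) (hpre : Pre_mostPoints qs) (k : Nat)
    (hk : k < qs.length) (st : List Int × List Int) (h : InvB qs k st) :
    InvB qs (k + 1) (stepB qs st k) := by
  obtain ⟨hlen, hfin, hlow, hup⟩ := h
  unfold stepB
  dsimp only
  have hp : (qs.getD k []).getD 0 0 = pvA qs k := rfl
  rw [hp, pre_bZ qs hpre k hk]
  set dp := st.1 with hdp0
  set finals := st.2 with hfin0
  set v := dp.getD k 0 with hv
  set p := pvA qs k with hpdef
  set dp1 := if v > dp.getD (k + 1) 0 then dp.set (k + 1) v else dp with hdp1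
  have hlen1 : dp1.length = qs.length + 1 := by rw [hdp1, relax_length, hlen]
  have f2 : dp1.getD k 0 = v := by rw [hdp1, relax_getD_ne dp (k+1) v k (by omega)]
  rw [f2]
  have hcast : (k : Int) + (pvB qs k : Int) + 1 = ((k + pvB qs k + 1 : Nat) : Int) := by
    push_cast; ring
  rw [hcast]
  set m := k + pvB qs k + 1 with hmdef
  have hmk : k + 1 ≤ m := by omega
  -- shared facts
  have hvk : v + Gv qs k ≤ Gv qs 0 := hlow k (le_refl _) (by omega)
  have hd1le : ∀ j, dp1.getD j 0 ≤ max (dp.getD j 0) v := by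
    intro j; rw [hdp1]; exact relax_le dp (k+1) v j
  have hd1mono : ∀ j, dp.getD j 0 ≤ dp1.getD j 0 := by
    intro j; rw [hdp1]; exact relax_mono dp (k+1) v j
  have hGvj : ∀ j, k + 1 ≤ j → j + 1 ≤ qs.length → v + Gv qs j ≤ Gv qs 0 := by
    intro j hj1 hj2
    have := Gv_antitone qs (i := k) (j := j) (by omega) (by omega)
    omega
  by_cases hnx : (m : Int) < (qs.length : Int)
  · -- the solve is pushed forward to dp[m]
    have hnxN : m < qs.length := by exact_mod_cast hnx
    rw [if_pos hnx, PySem.List.pyGetD_natCast dp1 m 0, PySem.List.pySetD_natCast]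
    have hGrec := Gv_rec_mid qs k (by omega) hnxN
    rw [← hmdef] at hGrec
    set dp2 := if v + p > dp1.getD m 0 then dp1.set m (v + p) else dp1 with hdp2
    show InvB qs (k + 1) (dp2, finals)
    unfold InvB
    dsimp only
    have hd2mono : ∀ j, dp1.getD j 0 ≤ dp2.getD j 0 := by
      intro j; rw [hdp2]; exact relax_mono dp1 m (v + p) j
    refine ⟨by rw [hdp2, relax_length, hlen1], hfin, ?_, ?_⟩
    · intro j hj1 hj2
      have hGvpj : v + p + Gv qs m ≤ Gv qs 0 := by
        have : p + Gv qs m ≤ Gv qs k := by rw [hGrec]; exact le_max_left _ _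
        omega
      by_cases hjm : j = m
      · have h2le : dp2.getD j 0 ≤ max (dp1.getD j 0) (v + p) := by
          rw [hdp2, hjm]; exact relax_le dp1 m (v + p) m
        have h1le := hd1le j
        have hold := hlow j (by omega) hj2
        have hGv := hGvj j hj1 hj2
        rw [hjm] at h2le ⊢
        have h1le' := hd1le m
        have hold' := hlow m (by omega) (by omega)
        have hGv' := hGvj m hmk (by omega)
        omega
      · have h2 : dp2.getD j 0 = dp1.getD j 0 := by
          rw [hdp2]; exact relax_getD_ne dp1 m (v + p) j hjm
        have h1le := hd1le j
        have hold := hlow j (by omega) hj2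
        have hGv := hGvj j hj1 hj2
        omega
    · rcases hup with hupf | ⟨j0, hj0k, hj0n, hub⟩
      · exact Or.inl hupf
      · rcases Nat.lt_or_ge j0 (k + 1) with hj0lt | hj0ge
        · have hj0 : j0 = k := by omega
          rw [hj0, hGrec] at hub
          have hub' : Gv qs 0 ≤ max (v + (p + Gv qs m)) (v + Gv qs (k + 1)) := by omega
          rcases le_max_iff.mp hub' with h1 | h1
          · refine Or.inr ⟨m, hmk, by omega, ?_⟩
            have hge : v + p ≤ dp2.getD m 0 := by
              rw [hdp2]; exact relax_ge dp1 m (v + p) (by omega)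
            omega
          · refine Or.inr ⟨k + 1, le_refl _, by omega, ?_⟩
            have hge1 : v ≤ dp1.getD (k + 1) 0 := by
              rw [hdp1]; exact relax_ge dp (k + 1) v (by omega)
            have hge2 := hd2mono (k + 1)
            omega
        · refine Or.inr ⟨j0, hj0ge, hj0n, ?_⟩
          have hge1 := hd1mono j0
          have hge2 := hd2mono j0
          omega
  · -- the solve is final: its value goes to finals
    have hnxN : ¬ (m < qs.length) := by exact_mod_cast hnx
    rw [if_neg hnx]
    show InvB qs (k + 1) (dp1, finals ++ [v + p])
    unfold InvB
    dsimp only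
    have hsval : p ≤ Gv qs k := by
      by_cases hs : k + 1 < qs.length
      · rw [Gv_rec_mid_term qs k hs hnxN]; exact le_trans (le_max_left _ _) (le_refl _)
      · rw [Gv_rec_last qs k hk hs]
    refine ⟨hlen1, ?_, ?_, ?_⟩
    · intro x hx
      rcases List.mem_append.mp hx with hx | hx
      · exact hfin x hx
      · have : x = v + p := List.mem_singleton.mp hx
        omega
    · intro j hj1 hj2
      have h1le := hd1le j
      have hold := hlow j (by omega) hj2
      have hGv := hGvj j hj1 hj2
      omega
    · rcases hup with hupf | ⟨j0, hj0k, hj0n, hub⟩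
      · obtain ⟨x, hx1, hx2⟩ := hupf
        exact Or.inl ⟨x, List.mem_append.mpr (Or.inl hx1), hx2⟩
      · rcases Nat.lt_or_ge j0 (k + 1) with hj0lt | hj0ge
        · have hj0 : j0 = k := by omega
          rw [hj0] at hub
          by_cases hs : k + 1 < qs.length
          · rw [Gv_rec_mid_term qs k hs hnxN] at hub
            have hub' : Gv qs 0 ≤ max (v + p) (v + Gv qs (k + 1)) := by omega
            rcases le_max_iff.mp hub' with h1 | h1
            · exact Or.inl ⟨v + p, List.mem_append.mpr (Or.inr (List.mem_singleton.mpr rfl)), h1⟩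
            · refine Or.inr ⟨k + 1, le_refl _, by omega, ?_⟩
              have hge1 : v ≤ dp1.getD (k + 1) 0 := by
                rw [hdp1]; exact relax_ge dp (k + 1) v (by omega)
              omega
          · rw [Gv_rec_last qs k hk hs] at hub
            exact Or.inl ⟨v + p, List.mem_append.mpr (Or.inr (List.mem_singleton.mpr rfl)), by omega⟩
        · refine Or.inr ⟨j0, hj0ge, hj0n, ?_⟩
          have hge1 := hd1mono j0
          omega

theorem loopB (qs : List (List Int)) (hpre : Pre_mostPoints qs) :
    ∀ (k : Nat), k ≤ qs.length →
      InvB qs k ((List.range k).foldl (stepB qs) (List.replicate (qs.length + 1) (0:Int), [])) := by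
  intro k
  induction k with
  | zero =>
    intro _
    simp only [List.range_zero, List.foldl_nil]
    refine ⟨by simp, by simp, ?_, Or.inr ⟨0, le_refl _, ?_, ?_⟩⟩
    · intro j _ hj2
      rw [getD_replicate_zero]
      have := Gv_antitone qs (Nat.zero_le j) (by omega)
      omega
    · have := List.length_pos_iff.mpr hpre.1; omega
    · rw [getD_replicate_zero]; omega
  | succ k ih =>
    intro hk
    rw [List.range_succ, List.foldl_append, List.foldl_cons, List.foldl_nil]
    exact stepB_inv qs hpre k (by omega) _ (ih (by omega))

theorem mostPoints_alt_eq_Gv (qs : List (List Int)) (hpre : Pre_mostPoints qs) :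
    mostPoints_alt qs = Gv qs 0 := by
  rw [mostPoints_alt_eq_fold]
  obtain ⟨hlen, hfin, hlow, hup⟩ := loopB qs hpre qs.length (le_refl _)
  have hupf : ∃ x ∈ ((List.range qs.length).foldl (stepB qs)
      (List.replicate (qs.length + 1) (0:Int), [])).2, Gv qs 0 ≤ x := by
    rcases hup with h | ⟨j, hj1, hj2, _⟩
    · exact h
    · omega
  obtain ⟨x, hx, hxge⟩ := hupf
  obtain ⟨mx, hmx⟩ : ∃ mx, PySem.List.max? ((List.range qs.length).foldl (stepB qs)
      (List.replicate (qs.length + 1) (0:Int), [])).2 (fun x => x) = some mx := by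
    rcases hmx : PySem.List.max? _ (fun x : Int => x) with _ | mx
    · rw [PySem.List.max?_eq_none_iff] at hmx
      rw [hmx] at hx
      exact absurd hx (List.not_mem_nil)
    · exact ⟨mx, rfl⟩
  rw [hmx, Option.getD_some]
  have hmem := PySem.List.max?_mem hmx
  have hismax := PySem.List.max?_isMax hmx x hx
  have h1 : mx ≤ Gv qs 0 := hfin mx hmem
  omega

-- ===== VERDICT (by name: the statement is the Claim_ definition above) =====
theorem mostPoints_spec : Claim_equal_mostPoints := by
  intro qs _ hpre
  unfold Spec_mostPoints
  rw [mostPoints_eq_Gv qs hpre, mostPoints_alt_eq_Gv qs hpre]
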